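-- pv_equiv track=rewrite | github.com/olivermop/bioinformatics-portfolio | exercises/estimate_ktl.py | estimate_L
-- ===== SOURCE A (Python) =====
-- import collections
--
-- def estimate_L(genome, k):
--     distances = []
--     k_mer_positions = collections.defaultdict(list)
--
--     # Find all positions of each k-mer
--     for i in range(len(genome) - k + 1):
--         k_mer = genome[i:i + k]
--         k_mer_positions[k_mer].append(i)
--
--     # Calculate distances between repeat positions of each k-mer
--     for positions in k_mer_positions.values():
--         if len(positions) > 1:
--             for j in range(1, len(positions)):
--                 distances.append(positions[j] - positions[j - 1])
--
--     # Use the average distance as window size L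
--     if distances:
--         avg_distance = sum(distances) // len(distances)
--         return avg_distance
--     else:
--         return None  # Not enough repeats found to estimate L
-- ===== SOURCE B (Python) =====
-- def estimate_L(genome, k):
--     # Single pass: gaps between consecutive occurrences of a k-mer telescope,
--     # so we only need the last seen position per k-mer plus two counters.
--     last_seen = {}
--     total = 0
--     count = 0
--     for i in range(len(genome) - k + 1):
--         kmer = genome[i:i + k]
--         if kmer in last_seen:
--             total += i - last_seen[kmer]
--             count += 1
--         last_seen[kmer] = i
--     return total // count if count else None
-- ===== Notes on version B (the rewrite author's own statement) =====
-- stated objective: simpler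
-- what changed: Replaces the two-phase approach (group all positions per k-mer into lists, then loop over each list computing pairwise differences and collecting them in a distances list) with one pass keeping only the last seen index per k-mer and two scalar accumulators, exploiting that consecutive gaps telescope; no position lists or distances list are built.
import Mathlib
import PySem

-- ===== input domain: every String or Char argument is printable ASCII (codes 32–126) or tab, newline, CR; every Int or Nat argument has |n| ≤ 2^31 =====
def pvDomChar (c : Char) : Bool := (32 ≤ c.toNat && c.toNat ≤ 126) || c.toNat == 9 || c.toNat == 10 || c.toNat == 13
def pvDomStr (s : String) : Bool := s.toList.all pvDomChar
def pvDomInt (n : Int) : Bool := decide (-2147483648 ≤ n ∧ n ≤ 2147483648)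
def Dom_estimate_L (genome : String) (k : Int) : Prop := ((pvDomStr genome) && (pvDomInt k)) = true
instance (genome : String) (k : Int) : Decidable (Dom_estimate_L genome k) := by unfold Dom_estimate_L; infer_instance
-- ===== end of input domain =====

-- B replaces A's two-phase grouping (position lists per k-mer, then pairwise differences)
-- by a single pass with a last-seen index per k-mer and two scalar accumulators (simpler).

-- ===== PORT A =====
def estimate_L (genome : String) (k : Int) : Option Int :=
  let d := (PySem.List.pyRange 0 (PySem.Str.len genome - k + 1) 1).foldl
      (fun d i => d.modify (PySem.Str.slice genome (some i) (some (i + k))) [] (fun ps => ps ++ [i]))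
      (PySem.Dict.empty : PySem.Dict String (List Int))
  let distances := d.values.foldl
      (fun acc positions =>
        if 1 < PySem.List.len positions then
          (PySem.List.pyRange 1 (PySem.List.len positions) 1).foldl
            (fun acc j =>
              acc ++ [PySem.List.pyGetD positions j 0 - PySem.List.pyGetD positions (j - 1) 0]) acc
        else acc)
      ([] : List Int)
  if distances ≠ [] then
    some (PySem.Int.floordiv distances.sum (PySem.List.len distances))
  else none

-- ===== PORT B =====
def estimate_L_alt (genome : String) (k : Int) : Option Int :=
  let st := (PySem.List.pyRange 0 (PySem.Str.len genome - k + 1) 1).foldl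
      (fun st i =>
        let kmer := PySem.Str.slice genome (some i) (some (i + k))
        let st' := if st.1.contains kmer then
            (st.1, st.2.1 + (i - st.1.getD kmer 0), st.2.2 + 1)
          else st
        (st'.1.insert kmer i, st'.2.1, st'.2.2))
      ((PySem.Dict.empty : PySem.Dict String Int), (0 : Int), (0 : Int))
  if st.2.2 ≠ 0 then some (PySem.Int.floordiv st.2.1 st.2.2) else none

-- ===== PRECONDITION & SPEC =====
def Spec_estimate_L (genome : String) (k : Int) (out : Option Int) : Prop := out = estimate_L_alt genome k
instance (genome : String) (k : Int) (out : Option Int) : Decidable (Spec_estimate_L genome k out) := by unfold Spec_estimate_L; infer_instance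

-- ===== CLAIM (what is proved, stated in full; the proofs are below) =====
def Claim_equal_estimate_L : Prop := ∀ (genome : String) (k : Int), Dom_estimate_L genome k → Spec_estimate_L genome k (estimate_L genome k)

-- ===== LEMMAS AND PROOFS =====

-- A's dict-building fold and its distances list, generic in the index list and the k-mer function.
def pvAdist (km : Int → String) (l : List Int) : List Int :=
  (l.foldl (fun d i => d.modify (km i) [] (fun ps => ps ++ [i]))
      (PySem.Dict.empty : PySem.Dict String (List Int))).values.foldl
    (fun acc positions =>
      if 1 < PySem.List.len positions then
        (PySem.List.pyRange 1 (PySem.List.len positions) 1).foldl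
          (fun acc j =>
            acc ++ [PySem.List.pyGetD positions j 0 - PySem.List.pyGetD positions (j - 1) 0]) acc
      else acc)
    ([] : List Int)

def pvA (km : Int → String) (l : List Int) : Option Int :=
  if pvAdist km l ≠ [] then
    some (PySem.Int.floordiv (pvAdist km l).sum (PySem.List.len (pvAdist km l)))
  else none

-- B's single-pass fold (last-seen dict, total, count), generic likewise.
def pvBfold (km : Int → String) (l : List Int) : PySem.Dict String Int × Int × Int :=
  l.foldl
      (fun st i =>
        let kmer := km i
        let st' := if st.1.contains kmer then
            (st.1, st.2.1 + (i - st.1.getD kmer 0), st.2.2 + 1)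
          else st
        (st'.1.insert kmer i, st'.2.1, st'.2.2))
      ((PySem.Dict.empty : PySem.Dict String Int), (0 : Int), (0 : Int))

def pvB (km : Int → String) (l : List Int) : Option Int :=
  if (pvBfold km l).2.2 ≠ 0 then
    some (PySem.Int.floordiv (pvBfold km l).2.1 (pvBfold km l).2.2)
  else none

def pvDiffs (ps : List Int) : List Int :=
  (List.range (ps.length - 1)).map (fun m => ps.getD (m + 1) 0 - ps.getD m 0)

def pvG (km : Int → String) (l : List Int) (c : String) : List Int :=
  l.filter (fun i => km i == c)

def pvS (km : Int → String) (l : List Int) : List String := PySem.Set.ofList (l.map km)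

lemma pvDiffs_short (ps : List Int) (h : ps.length ≤ 1) : pvDiffs ps = [] := by
  unfold pvDiffs
  have h0 : ps.length - 1 = 0 := by omega
  simp [h0]

lemma pvDiffs_append_singleton (ps : List Int) (x : Int) (h : ps ≠ []) :
    pvDiffs (ps ++ [x]) = pvDiffs ps ++ [x - ps.getLast?.getD 0] := by
  have hp : 0 < ps.length := List.length_pos_of_ne_nil h
  unfold pvDiffs
  have hlen : (ps ++ [x]).length - 1 = (ps.length - 1) + 1 := by
    simp; omega
  rw [hlen, List.range_succ, List.map_append]
  congr 1
  · apply List.map_congr_left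
    intro m hm
    rw [List.mem_range] at hm
    rw [List.getD_append _ _ _ _ (by omega), List.getD_append _ _ _ _ (by omega)]
  · simp only [List.map_cons, List.map_nil]
    have h1 : ps.length - 1 + 1 = ps.length := by omega
    congr 2
    · rw [h1, List.getD_append_right _ _ _ _ (le_refl _)]
      simp
    · rw [List.getD_append _ _ _ _ (by omega), List.getD_eq_getElem?_getD,
        ← List.getLast?_eq_getElem?]

lemma pv_inner (ps : List Int) (acc : List Int) :
    (PySem.List.pyRange 1 (PySem.List.len ps) 1).foldl
      (fun acc j => acc ++ [PySem.List.pyGetD ps j 0 - PySem.List.pyGetD ps (j - 1) 0]) acc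
      = acc ++ pvDiffs ps := by
  rw [PySem.List.len_eq, PySem.List.pyRange_one, List.foldl_map]
  have ht : ((ps.length : Int) - 1).toNat = ps.length - 1 := by omega
  rw [ht]
  have hb : ∀ (a : List Int), ∀ m ∈ List.range (ps.length - 1),
      (a ++ [PySem.List.pyGetD ps (1 + (m : Int)) 0 - PySem.List.pyGetD ps (1 + (m : Int) - 1) 0])
      = a ++ [ps.getD (m + 1) 0 - ps.getD m 0] := by
    intro a m _
    have h1 : (1 : Int) + (m : Int) = ((m + 1 : Nat) : Int) := by push_cast; ring
    have h2 : (1 : Int) + (m : Int) - 1 = ((m : Nat) : Int) := by omega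
    rw [h2, h1, PySem.List.pyGetD_natCast, PySem.List.pyGetD_natCast]
  rw [PySem.List.foldl_congr_mem _ _ _ acc hb]
  exact PySem.List.foldl_append_singleton_eq_map _ _ _

lemma pv_sum_map_congr_except {α : Type} [DecidableEq α] (S : List α) (k0 : α)
    (hmem : k0 ∈ S) (hnd : S.Nodup) (f g : α → Int)
    (hcong : ∀ x ∈ S, x ≠ k0 → g x = f x) :
    (S.map g).sum = (S.map f).sum + (g k0 - f k0) := by
  induction S with
  | nil => cases hmem
  | cons a S ih =>
    obtain ⟨hna, hndS⟩ := List.nodup_cons.mp hnd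
    rcases List.mem_cons.mp hmem with rfl | hmem'
    · have hcg : ∀ x ∈ S, g x = f x := by
        intro x hx
        exact hcong x (List.mem_cons_of_mem _ hx) (fun he => hna (he ▸ hx))
      rw [List.map_cons, List.map_cons, List.sum_cons, List.sum_cons,
        List.map_congr_left hcg]
      ring
    · have hne : a ≠ k0 := fun he => hna (he ▸ hmem')
      have := ih hmem' hndS (fun x hx hxk => hcong x (List.mem_cons_of_mem _ hx) hxk)
      rw [List.map_cons, List.map_cons, List.sum_cons, List.sum_cons, this,
        hcong a (List.mem_cons_self) hne]
      ring

lemma pvG_append (km : Int → String) (l : List Int) (i : Int) (c : String) :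
    pvG km (l ++ [i]) c = pvG km l c ++ (if km i = c then [i] else []) := by
  unfold pvG
  rw [List.filter_append]
  congr 1
  by_cases h : km i = c <;> simp [h]

lemma pvG_mem_S (km : Int → String) (l : List Int) (i : Int) :
    pvG km l (km i) ≠ [] ↔ km i ∈ pvS km l := by
  unfold pvG pvS
  rw [PySem.Set.mem_ofList]
  constructor
  · intro h
    obtain ⟨x, hx⟩ := List.exists_mem_of_ne_nil _ h
    obtain ⟨hxl, hp⟩ := List.mem_filter.mp hx
    rw [beq_iff_eq] at hp
    exact List.mem_map.mpr ⟨x, hxl, hp⟩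
  · intro h hn
    obtain ⟨j, hj, hkm⟩ := List.mem_map.mp h
    have := List.filter_eq_nil_iff.mp hn j hj
    simp [hkm] at this

lemma pvSetOfList_append_singleton (xs : List String) (x : String) :
    PySem.Set.ofList (xs ++ [x]) = PySem.Set.add (PySem.Set.ofList xs) x := by
  rw [PySem.Set.ofList_eq_foldl, PySem.Set.ofList_eq_foldl, List.foldl_append]
  rfl

lemma pvS_append_mem (km : Int → String) (l : List Int) (i : Int) (h : km i ∈ pvS km l) :
    pvS km (l ++ [i]) = pvS km l := by
  unfold pvS at *
  rw [List.map_append]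
  simp only [List.map_cons, List.map_nil]
  rw [pvSetOfList_append_singleton]
  simp only [PySem.Set.add, PySem.Set.contains]
  rw [if_pos (List.contains_iff_mem.mpr h)]

lemma pvS_append_not_mem (km : Int → String) (l : List Int) (i : Int) (h : ¬ km i ∈ pvS km l) :
    pvS km (l ++ [i]) = pvS km l ++ [km i] := by
  unfold pvS at *
  rw [List.map_append]
  simp only [List.map_cons, List.map_nil]
  rw [pvSetOfList_append_singleton]
  simp only [PySem.Set.add, PySem.Set.contains]
  rw [if_neg (fun hc => h (List.contains_iff_mem.mp hc))]

lemma pvS_nodup (km : Int → String) (l : List Int) : (pvS km l).Nodup :=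
  PySem.Set.nodup_ofList _

lemma pvBfold_append (km : Int → String) (l : List Int) (i : Int) :
    pvBfold km (l ++ [i]) =
      (let st := pvBfold km l
       let st' := if st.1.contains (km i) then
           (st.1, st.2.1 + (i - st.1.getD (km i) 0), st.2.2 + 1)
         else st
       (st'.1.insert (km i) i, st'.2.1, st'.2.2)) := by
  unfold pvBfold
  rw [List.foldl_append]
  rfl

lemma pv_Binv (km : Int → String) (l : List Int) :
    (∀ c, (pvBfold km l).1.get? c = (pvG km l c).getLast?) ∧
    (pvBfold km l).2.1 = ((pvS km l).map (fun c => (pvDiffs (pvG km l c)).sum)).sum ∧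
    (pvBfold km l).2.2 = ((pvS km l).map (fun c => ((pvDiffs (pvG km l c)).length : Int))).sum := by
  induction l using List.reverseRecOn with
  | nil =>
    refine ⟨fun c => ?_, ?_, ?_⟩ <;>
      simp [pvBfold, pvG, pvS, PySem.Set.ofList, PySem.Dict.get?_empty]
  | append_singleton l i ih =>
    obtain ⟨ih1, ih2, ih3⟩ := ih
    have hcontains : (pvBfold km l).1.contains (km i) = true ↔ km i ∈ pvS km l := by
      rw [PySem.Dict.contains_eq_isSome_get?, ih1, List.getLast?_isSome, pvG_mem_S]
    by_cases hc : (pvBfold km l).1.contains (km i) = true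
    · -- the k-mer was already seen
      have hmem : km i ∈ pvS km l := hcontains.mp hc
      have hne : pvG km l (km i) ≠ [] := (pvG_mem_S km l i).mpr hmem
      have hS : pvS km (l ++ [i]) = pvS km l := pvS_append_mem km l i hmem
      have hstep : pvBfold km (l ++ [i]) =
          ((pvBfold km l).1.insert (km i) i,
           (pvBfold km l).2.1 + (i - (pvBfold km l).1.getD (km i) 0),
           (pvBfold km l).2.2 + 1) := by
        rw [pvBfold_append]
        simp only [hc, if_true]
      have hlast : (pvBfold km l).1.getD (km i) 0 = (pvG km l (km i)).getLast?.getD 0 := by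
        rw [PySem.Dict.getD_eq_get?_getD, ih1]
      refine ⟨fun c => ?_, ?_, ?_⟩
      · rw [hstep]
        simp only
        rw [PySem.Dict.get?_insert]
        by_cases hcc : c = km i
        · subst hcc
          rw [if_pos rfl, pvG_append, if_pos rfl, List.getLast?_concat]
        · rw [if_neg hcc, ih1 c, pvG_append,
            if_neg (fun he => hcc he.symm), List.append_nil]
      · have hdelta : (pvDiffs (pvG km (l ++ [i]) (km i))).sum
            = (pvDiffs (pvG km l (km i))).sum + (i - (pvG km l (km i)).getLast?.getD 0) := by
          rw [pvG_append, if_pos rfl, pvDiffs_append_singleton _ _ hne]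
          simp
        rw [hstep]
        simp only
        rw [ih2, hlast, hS,
          pv_sum_map_congr_except (pvS km l) (km i) hmem (pvS_nodup km l)
            (fun c => (pvDiffs (pvG km l c)).sum)
            (fun c => (pvDiffs (pvG km (l ++ [i]) c)).sum)
            (fun x _ hx => by
              show (pvDiffs (pvG km (l ++ [i]) x)).sum = (pvDiffs (pvG km l x)).sum
              rw [pvG_append, if_neg (fun he => hx he.symm), List.append_nil])]
        rw [hdelta]
        ring
      · have hdelta : ((pvDiffs (pvG km (l ++ [i]) (km i))).length : Int)
            = ((pvDiffs (pvG km l (km i))).length : Int) + 1 := by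
          rw [pvG_append, if_pos rfl, pvDiffs_append_singleton _ _ hne, List.length_append]
          simp
        rw [hstep]
        simp only
        rw [ih3, hS,
          pv_sum_map_congr_except (pvS km l) (km i) hmem (pvS_nodup km l)
            (fun c => ((pvDiffs (pvG km l c)).length : Int))
            (fun c => ((pvDiffs (pvG km (l ++ [i]) c)).length : Int))
            (fun x _ hx => by
              show ((pvDiffs (pvG km (l ++ [i]) x)).length : Int) = ((pvDiffs (pvG km l x)).length : Int)
              rw [pvG_append, if_neg (fun he => hx he.symm), List.append_nil])]
        rw [hdelta]
        ring
    · -- first occurrence of the k-mer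
      have hmem : ¬ km i ∈ pvS km l := fun h => hc (hcontains.mpr h)
      have hnil : pvG km l (km i) = [] := by
        by_contra h
        exact hmem ((pvG_mem_S km l i).mp h)
      have hS : pvS km (l ++ [i]) = pvS km l ++ [km i] := pvS_append_not_mem km l i hmem
      have hstep : pvBfold km (l ++ [i]) =
          ((pvBfold km l).1.insert (km i) i,
           (pvBfold km l).2.1, (pvBfold km l).2.2) := by
        rw [pvBfold_append]
        simp [hc]
      have hGnew : pvG km (l ++ [i]) (km i) = [i] := by
        rw [pvG_append, if_pos rfl, hnil, List.nil_append]
      have hunch : ∀ x ∈ pvS km l, pvG km (l ++ [i]) x = pvG km l x := by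
        intro x hx
        have : km i ≠ x := fun he => hmem (he ▸ hx)
        rw [pvG_append, if_neg this, List.append_nil]
      refine ⟨fun c => ?_, ?_, ?_⟩
      · rw [hstep]
        simp only
        rw [PySem.Dict.get?_insert]
        by_cases hcc : c = km i
        · subst hcc
          rw [if_pos rfl, hGnew]
          rfl
        · rw [if_neg hcc, ih1 c, pvG_append,
            if_neg (fun he => hcc he.symm), List.append_nil]
      · have h0 : pvDiffs (pvG km (l ++ [i]) (km i)) = [] := by
          rw [hGnew]
          exact pvDiffs_short [i] (by simp)
        rw [hstep]
        simp only
        have hmapeq : List.map (fun c => (pvDiffs (pvG km (l ++ [i]) c)).sum) (pvS km l)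
            = List.map (fun c => (pvDiffs (pvG km l c)).sum) (pvS km l) :=
          List.map_congr_left (fun x hx => by
            show (pvDiffs (pvG km (l ++ [i]) x)).sum = (pvDiffs (pvG km l x)).sum
            rw [hunch x hx])
        rw [hS, List.map_append, List.sum_append, hmapeq, ih2]
        simp [h0]
      · have h0 : pvDiffs (pvG km (l ++ [i]) (km i)) = [] := by
          rw [hGnew]
          exact pvDiffs_short [i] (by simp)
        rw [hstep]
        simp only
        have hmapeq : List.map (fun c => ((pvDiffs (pvG km (l ++ [i]) c)).length : Int)) (pvS km l)
            = List.map (fun c => ((pvDiffs (pvG km l c)).length : Int)) (pvS km l) :=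
          List.map_congr_left (fun x hx => by
            show ((pvDiffs (pvG km (l ++ [i]) x)).length : Int) = ((pvDiffs (pvG km l x)).length : Int)
            rw [hunch x hx])
        rw [hS, List.map_append, List.sum_append, hmapeq, ih3]
        simp [h0]

lemma pv_A_distances (km : Int → String) (l : List Int) :
    pvAdist km l = (pvS km l).flatMap (fun c => pvDiffs (pvG km l c)) := by
  unfold pvAdist
  have hfold : l.foldl (fun d i => d.modify (km i) [] (fun ps => ps ++ [i]))
      (PySem.Dict.empty : PySem.Dict String (List Int))
      = (l.map (fun i => ((km i, i) : String × Int))).foldl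
          (fun d p => d.modify p.1 [] (fun ps => ps ++ [p.2]))
          (PySem.Dict.empty : PySem.Dict String (List Int)) := by
    rw [List.foldl_map]
  have hkeys : (l.foldl (fun d i => d.modify (km i) [] (fun ps => ps ++ [i]))
      (PySem.Dict.empty : PySem.Dict String (List Int))).keys = pvS km l := by
    rw [PySem.Dict.keys_foldl_modify_key l km [] (fun _ i => fun ps => ps ++ [i]) _,
      PySem.Dict.keys_empty]
    unfold pvS
    rw [PySem.Set.ofList_eq_foldl]
    rfl
  have hnd : (l.foldl (fun d i => d.modify (km i) [] (fun ps => ps ++ [i]))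
      (PySem.Dict.empty : PySem.Dict String (List Int))).keys.Nodup :=
    PySem.Dict.nodup_keys_foldl_modify_key l km [] (fun _ i => fun ps => ps ++ [i]) _
      PySem.Dict.nodup_keys_empty
  have hget : ∀ c, (l.foldl (fun d i => d.modify (km i) [] (fun ps => ps ++ [i]))
      (PySem.Dict.empty : PySem.Dict String (List Int))).getD c [] = pvG km l c := by
    intro c
    rw [hfold, PySem.Dict.getD_foldl_modify_append, PySem.Dict.getD_empty,
      List.nil_append, List.filter_map, List.map_map]
    unfold pvG
    simp [Function.comp_def]
  have hvalues : (l.foldl (fun d i => d.modify (km i) [] (fun ps => ps ++ [i]))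
      (PySem.Dict.empty : PySem.Dict String (List Int))).values
      = (pvS km l).map (fun c => pvG km l c) := by
    rw [PySem.Dict.values_eq_map_keys _ hnd [], hkeys]
    exact List.map_congr_left (fun c _ => hget c)
  rw [hvalues]
  have hbody : ∀ (acc : List Int), ∀ ps ∈ (pvS km l).map (fun c => pvG km l c),
      (if 1 < PySem.List.len ps then
        (PySem.List.pyRange 1 (PySem.List.len ps) 1).foldl
          (fun acc j =>
            acc ++ [PySem.List.pyGetD ps j 0 - PySem.List.pyGetD ps (j - 1) 0]) acc
      else acc) = acc ++ pvDiffs ps := by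
    intro acc ps _
    by_cases h1 : 1 < PySem.List.len ps
    · rw [if_pos h1]
      exact pv_inner ps acc
    · rw [if_neg h1]
      rw [PySem.List.len_eq] at h1
      rw [pvDiffs_short ps (by omega), List.append_nil]
  rw [PySem.List.foldl_congr_mem _ _ _ _ hbody,
    PySem.List.foldl_append_eq_flatMap pvDiffs _ _, List.nil_append,
    List.flatMap_def, List.map_map, ← List.flatMap_def]
  rfl

theorem pvMain (km : Int → String) (l : List Int) : pvA km l = pvB km l := by
  unfold pvA pvB
  obtain ⟨_, h2, h3⟩ := pv_Binv km l
  rw [pv_A_distances km l]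
  have hsum : ((pvS km l).flatMap (fun c => pvDiffs (pvG km l c))).sum = (pvBfold km l).2.1 := by
    rw [h2, List.flatMap_def, List.sum_flatten, List.map_map]
    rfl
  have hlen : (((pvS km l).flatMap (fun c => pvDiffs (pvG km l c))).length : Int)
      = (pvBfold km l).2.2 := by
    rw [h3, List.length_flatMap, Nat.cast_list_sum, List.map_map]
    rfl
  have hne : ((pvS km l).flatMap (fun c => pvDiffs (pvG km l c)) ≠ []) ↔ (pvBfold km l).2.2 ≠ 0 := by
    rw [← hlen]
    rw [Ne, ← List.length_eq_zero_iff]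
    omega
  by_cases hB : (pvBfold km l).2.2 ≠ 0
  · rw [if_pos (hne.mpr hB), if_pos hB, PySem.List.len_eq, hsum, hlen]
  · rw [if_neg (fun h => hB (hne.mp h)), if_neg hB]

-- ===== VERDICT (by name: the statement is the Claim_ definition above) =====
theorem estimate_L_spec : Claim_equal_estimate_L := by
  intro genome k _
  unfold Spec_estimate_L
  exact pvMain (fun i => PySem.Str.slice genome (some i) (some (i + k)))
    (PySem.List.pyRange 0 (PySem.Str.len genome - k + 1) 1)
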